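-- pv_equiv track=rewrite | github.com/jaromero3rd/AutoVideos | BusinessGPTpt2.py | formatGoogleQuery
-- ===== SOURCE A (Python) =====
-- def formatGoogleQuery(title):
--     searchURL = "https://www.google.com/search?q=" #&tbm=isch
--     titles = title.split(" ")
--     for word in titles:
--         searchURL = searchURL + word + "+"
--     searchURL = searchURL.removesuffix("+")
--     searchURL = searchURL + "&tbm=isch"
--     return searchURL
-- ===== SOURCE B (Python) =====
-- def formatGoogleQuery(title):
--     return "https://www.google.com/search?q=" + title.replace(" ", "+") + "&tbm=isch"
-- ===== Notes on version B (the rewrite author's own statement) =====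
-- stated objective: simpler
-- what changed: Replaces the split-into-words / rebuild-with-'+' loop plus removesuffix with a single str.replace of every space by '+', concatenated between the fixed prefix and suffix.
import Mathlib
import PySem

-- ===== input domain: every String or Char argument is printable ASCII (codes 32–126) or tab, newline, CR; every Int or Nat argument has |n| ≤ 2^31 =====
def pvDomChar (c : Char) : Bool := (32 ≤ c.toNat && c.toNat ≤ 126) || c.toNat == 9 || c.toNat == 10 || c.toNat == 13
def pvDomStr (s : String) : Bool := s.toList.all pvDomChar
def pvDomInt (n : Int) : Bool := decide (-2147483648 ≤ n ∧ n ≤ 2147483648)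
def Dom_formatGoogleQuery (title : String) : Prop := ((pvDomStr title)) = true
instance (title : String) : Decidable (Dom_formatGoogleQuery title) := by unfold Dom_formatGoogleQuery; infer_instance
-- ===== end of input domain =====

-- B builds the URL with a single space→'+' replacement instead of A's split/loop/removesuffix (objective: simpler).

-- ===== PORT A =====
-- str.removesuffix, ported by hand (exact): s[:len(s)-len(suf)] when suf is nonempty and a suffix, else s
def pyRemovesuffix (s suf : List Char) : List Char :=
  if suf ≠ [] ∧ PySem.Chars.endswith s suf then s.take (s.length - suf.length) else s

def formatGoogleQuery (title : String) : String :=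
  let searchURL := "https://www.google.com/search?q=".toList
  let titles := PySem.Chars.splitOn title.toList " ".toList
  let searchURL := titles.foldl (fun acc word => acc ++ word ++ "+".toList) searchURL
  let searchURL := pyRemovesuffix searchURL "+".toList
  String.mk (searchURL ++ "&tbm=isch".toList)

-- ===== PORT B =====
def formatGoogleQuery_alt (title : String) : String :=
  String.mk ("https://www.google.com/search?q=".toList
    ++ PySem.Chars.replace title.toList " ".toList "+".toList
    ++ "&tbm=isch".toList)

-- ===== PRECONDITION & SPEC =====
def Spec_formatGoogleQuery (title : String) (out : String) : Prop := out = formatGoogleQuery_alt title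
instance (title : String) (out : String) : Decidable (Spec_formatGoogleQuery title out) := by unfold Spec_formatGoogleQuery; infer_instance

-- ===== CLAIM (what is proved, stated in full; the proofs are below) =====
def Claim_equal_formatGoogleQuery : Prop := ∀ (title : String), Dom_formatGoogleQuery title → Spec_formatGoogleQuery title (formatGoogleQuery title)

-- ===== LEMMAS AND PROOFS =====

-- proof-only helpers: the per-character view of split-on-space and of space→'+' replacement
def pvRepl (c : Char) : Char := if c = ' ' then '+' else c

def pvSplitP (cur : List Char) : List Char → List (List Char)
  | [] => [cur]
  | c :: t => if c = ' ' then cur :: pvSplitP [] t else pvSplitP (cur ++ [c]) t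

lemma pv_splitOn_go (fuel : Nat) (l cur : List Char) (acc : List (List Char))
    (h : l.length < fuel) :
    PySem.Chars.splitOn.go [' '] fuel l cur acc = acc.reverse ++ pvSplitP cur.reverse l := by
  induction fuel generalizing l cur acc with
  | zero => omega
  | succ n ih =>
    cases l with
    | nil => simp [PySem.Chars.splitOn.go, pvSplitP]
    | cons c t =>
      simp only [PySem.Chars.splitOn.go]
      by_cases hc : c = ' '
      · subst hc
        rw [if_pos (by simp [List.isPrefixOf])]
        have hd : List.drop ([' '] : List Char).length (' ' :: t) = t := by simp
        rw [hd, ih t [] (cur.reverse :: acc) (by simpa using Nat.lt_of_succ_lt_succ h)]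
        simp [pvSplitP]
      · rw [if_neg (by simp [List.isPrefixOf, beq_iff_eq]; exact fun h => absurd h.symm hc)]
        rw [ih t (c :: cur) acc (by simpa using Nat.lt_of_succ_lt_succ h)]
        simp [pvSplitP, hc]

lemma pv_foldl_splitP (cs : List Char) (cur pre : List Char) :
    List.foldl (fun a w => a ++ w ++ ['+']) pre (pvSplitP cur cs)
      = pre ++ cur ++ cs.map pvRepl ++ ['+'] := by
  induction cs generalizing cur pre with
  | nil => simp [pvSplitP]
  | cons c t ih =>
    by_cases hc : c = ' '
    · subst hc
      simp only [pvSplitP, if_true, List.foldl_cons]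
      rw [ih]
      simp [pvRepl, List.append_assoc]
    · simp only [pvSplitP, if_neg hc]
      rw [ih]
      simp [pvRepl, hc, List.append_assoc]

lemma pv_replace_go (fuel : Nat) (l acc : List Char) (h : l.length ≤ fuel) :
    PySem.Chars.replace.go [' '] ['+'] fuel l acc = acc.reverse ++ l.map pvRepl := by
  induction fuel generalizing l acc with
  | zero =>
    cases l with
    | nil => simp [PySem.Chars.replace.go]
    | cons c t => simp at h
  | succ n ih =>
    cases l with
    | nil => simp [PySem.Chars.replace.go]
    | cons c t =>
      simp only [PySem.Chars.replace.go]
      by_cases hc : c = ' '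
      · subst hc
        rw [if_pos (by simp [List.isPrefixOf])]
        have hd : List.drop ([' '] : List Char).length (' ' :: t) = t := by simp
        have ha : (['+'] : List Char).reverse ++ acc = '+' :: acc := by simp
        rw [hd, ha, ih t ('+' :: acc) (by simpa using Nat.le_of_succ_le_succ h)]
        simp [pvRepl]
      · rw [if_neg (by simp [List.isPrefixOf, beq_iff_eq]; exact fun h => absurd h.symm hc)]
        rw [ih t (c :: acc) (by simpa using Nat.le_of_succ_le_succ h)]
        simp [pvRepl, hc]

lemma pv_key (cs pre : List Char) :
    pyRemovesuffix
        (List.foldl (fun a w => a ++ w ++ "+".toList) pre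
          (PySem.Chars.splitOn cs " ".toList)) "+".toList
      = pre ++ PySem.Chars.replace cs " ".toList "+".toList := by
  have hplus : "+".toList = ['+'] := rfl
  have hsp : " ".toList = [' '] := rfl
  rw [hplus, hsp]
  unfold PySem.Chars.splitOn PySem.Chars.replace
  rw [pv_splitOn_go (cs.length + 1) cs [] [] (by omega)]
  simp only [List.reverse_nil, List.nil_append]
  rw [pv_foldl_splitP]
  simp only [List.append_nil, List.isEmpty_cons, if_false, Bool.false_eq_true]
  rw [pv_replace_go cs.length cs [] (by omega)]
  simp only [List.reverse_nil, List.nil_append]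
  unfold pyRemovesuffix
  rw [if_pos]
  · simp only [List.length_append, List.length_map, List.length_cons, List.length_nil]
    have hlen : pre.length + cs.length + (0 + 1) - (0 + 1)
        = (pre ++ List.map pvRepl cs).length := by simp
    rw [hlen, List.take_left]
  · refine ⟨by simp, ?_⟩
    have : (['+'] : List Char) <:+ pre ++ List.map pvRepl cs ++ ['+'] :=
      ⟨pre ++ List.map pvRepl cs, by simp⟩
    exact (PySem.Chars.endswith_iff _ _).mpr this

-- ===== VERDICT (by name: the statement is the Claim_ definition above) =====
theorem formatGoogleQuery_spec : Claim_equal_formatGoogleQuery := by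
  intro title _
  show String.mk
      (pyRemovesuffix
        (List.foldl (fun acc word => acc ++ word ++ "+".toList)
          "https://www.google.com/search?q=".toList
          (PySem.Chars.splitOn title.toList " ".toList)) "+".toList
        ++ "&tbm=isch".toList)
    = formatGoogleQuery_alt title
  rw [pv_key]
  unfold formatGoogleQuery_alt
  rw [List.append_assoc]
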